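-- pv_equiv track=rewrite | github.com/koreakk/Online-Judge | boj/Level 2-3/25114. Sequence Conversion/Python.py | solution
-- ===== SOURCE A (Python) =====
-- def solution(n: int, a: list[int], b: list[int]) -> int:
--     count = 0
--     for i in range(n - 1):
--         if a[i] == b[i]:
--             continue
--
--         x = a[i] ^ b[i]
--         a[i] ^= x
--         a[i + 1] ^= x
--         count += 1
--
--     answer = count if a == b else -1
--     return answer
-- ===== SOURCE B (Python) =====
-- def solution(n: int, a: list[int], b: list[int]) -> int:
--     # Prefix-XOR formulation: the carry pushed into a[i] is the XOR of all
--     # earlier mismatches, i.e. px ^ py over the processed prefix.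
--     count = 0
--     px = py = 0
--     for i in range(n - 1):
--         px ^= a[i]
--         py ^= b[i]
--         if px != py:
--             count += 1
--         a[i] = b[i]
--     if n >= 2:
--         a[n - 1] ^= px ^ py
--     return count if a == b else -1
-- ===== Notes on version B (the rewrite author's own statement) =====
-- stated objective: alternative
-- what changed: Replaces A's in-place XOR-carry simulation (re-reading and rewriting a[i], a[i+1] each step) by a running prefix-XOR invariant: count the prefixes where the XORs of a and b differ, overwrite a[i]=b[i] directly, and fold the whole accumulated carry into a[n-1] once after the loop.
-- outside the precondition, e.g. on solution(2, [5], [5]): A returns 0, B raises IndexError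
import Mathlib
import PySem

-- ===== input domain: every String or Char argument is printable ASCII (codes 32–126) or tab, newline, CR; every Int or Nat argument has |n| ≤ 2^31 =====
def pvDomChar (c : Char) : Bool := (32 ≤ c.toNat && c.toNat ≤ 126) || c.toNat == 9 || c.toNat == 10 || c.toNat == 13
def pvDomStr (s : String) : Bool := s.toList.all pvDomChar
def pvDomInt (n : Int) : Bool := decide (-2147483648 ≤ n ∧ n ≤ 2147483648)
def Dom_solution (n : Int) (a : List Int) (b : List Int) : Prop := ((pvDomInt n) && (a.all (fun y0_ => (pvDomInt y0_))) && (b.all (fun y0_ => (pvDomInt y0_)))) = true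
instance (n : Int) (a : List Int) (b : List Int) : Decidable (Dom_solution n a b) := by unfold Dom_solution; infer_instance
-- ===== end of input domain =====

-- B replaces A's step-by-step in-place XOR-carry propagation by a running prefix-XOR
-- invariant (same O(n) cost, different bookkeeping); equivalence is about the RETURN
-- value only — the Python A mutates `a` in place, and the Python B performs the same
-- final mutation of `a` on every input admitted by Pre_solution.

-- ===== PORT A =====
-- loop body of A: reads a[i], b[i]; on mismatch xors a[i] and a[i+1] and counts
def stepA (b : List Int) (st : List Int × Int) (i : Int) : List Int × Int :=
  let ai := PySem.List.pyGetD st.1 i 0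
  let bi := PySem.List.pyGetD b i 0
  if ai = bi then st
  else
    let x := PySem.Int.bxor ai bi
    let a1 := PySem.List.pySetD st.1 i (PySem.Int.bxor ai x)
    let a2 := PySem.List.pySetD a1 (i + 1) (PySem.Int.bxor (PySem.List.pyGetD a1 (i + 1) 0) x)
    (a2, st.2 + 1)

def solution (n : Int) (a : List Int) (b : List Int) : Int :=
  let st := (PySem.List.pyRange 0 (n - 1) 1).foldl (stepA b) (a, 0)
  if st.1 = b then st.2 else -1

-- ===== PORT B =====
-- loop body of B: running prefix xors px, py; count when they differ; a[i] = b[i]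
def stepB (b : List Int) (st : List Int × Int × Int × Int) (i : Int) : List Int × Int × Int × Int :=
  let px := PySem.Int.bxor st.2.1 (PySem.List.pyGetD st.1 i 0)
  let py := PySem.Int.bxor st.2.2.1 (PySem.List.pyGetD b i 0)
  let count := if px ≠ py then st.2.2.2 + 1 else st.2.2.2
  (PySem.List.pySetD st.1 i (PySem.List.pyGetD b i 0), px, py, count)

def solution_alt (n : Int) (a : List Int) (b : List Int) : Int :=
  let st := (PySem.List.pyRange 0 (n - 1) 1).foldl (stepB b) (a, 0, 0, 0)
  let a2 :=
    if 2 ≤ n then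
      PySem.List.pySetD st.1 (n - 1)
        (PySem.Int.bxor (PySem.List.pyGetD st.1 (n - 1) 0) (PySem.Int.bxor st.2.1 st.2.2.1))
    else st.1
  if a2 = b then st.2.2.2 else -1

-- ===== PRECONDITION & SPEC =====
-- Pre_ excludes the inputs on which A's indexing can raise IndexError; it also excludes
-- inputs with a.length = n - 1 on which A happens to return only because its last loop
-- step skips the a[i+1] write (e.g. (2, [5], [5])) — there B naturally raises IndexError.
def Pre_solution (n : Int) (a : List Int) (b : List Int) : Prop :=
  n ≤ 1 ∨ (n ≤ (a.length : Int) ∧ n - 1 ≤ (b.length : Int))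
instance (n : Int) (a : List Int) (b : List Int) : Decidable (Pre_solution n a b) := by
  unfold Pre_solution; infer_instance
def pvWitness_solution : Int × List Int × List Int := (3, [1, 2, 3], [3, 2, 1])
def Spec_solution (n : Int) (a : List Int) (b : List Int) (out : Int) : Prop :=
  out = solution_alt n a b
instance (n : Int) (a : List Int) (b : List Int) (out : Int) : Decidable (Spec_solution n a b out) := by
  unfold Spec_solution; infer_instance

-- ===== CLAIM (what is proved, stated in full; the proofs are below) =====
def Claim_equal_solution : Prop := ∀ (n : Int) (a : List Int) (b : List Int),
  Dom_solution n a b → Pre_solution n a b → Spec_solution n a b (solution n a b)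

-- ===== LEMMAS AND PROOFS =====

theorem bxor_ofNat (m n : Nat) :
    PySem.Int.bxor (Int.ofNat m) (Int.ofNat n) = Int.ofNat (m ^^^ n) := by
  simp [PySem.Int.bxor]

theorem bxor_ofNat_negSucc (m n : Nat) :
    PySem.Int.bxor (Int.ofNat m) (Int.negSucc n) = Int.negSucc (m ^^^ n) := by
  simp [PySem.Int.bxor, Int.negSucc_eq]
  rw [if_neg (by omega)]
  have h : (-1 + -(n : Int)).toNat = 0 := by omega
  omega

theorem bxor_negSucc_ofNat (m n : Nat) :
    PySem.Int.bxor (Int.negSucc m) (Int.ofNat n) = Int.negSucc (m ^^^ n) := by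
  simp [PySem.Int.bxor, Int.negSucc_eq]
  rw [if_neg (by omega)]
  omega

theorem bxor_negSucc_negSucc (m n : Nat) :
    PySem.Int.bxor (Int.negSucc m) (Int.negSucc n) = Int.ofNat (m ^^^ n) := by
  simp [PySem.Int.bxor, Int.negSucc_eq]
  rw [if_neg (by omega), if_neg (by omega)]

theorem bxor_assoc (a b c : Int) :
    PySem.Int.bxor (PySem.Int.bxor a b) c = PySem.Int.bxor a (PySem.Int.bxor b c) := by
  cases a <;> cases b <;> cases c <;>
    simp only [bxor_ofNat, bxor_ofNat_negSucc, bxor_negSucc_ofNat, bxor_negSucc_negSucc,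
      Nat.xor_assoc]

theorem bxor_left_comm (a b c : Int) :
    PySem.Int.bxor a (PySem.Int.bxor b c) = PySem.Int.bxor b (PySem.Int.bxor a c) := by
  rw [← bxor_assoc, PySem.Int.bxor_comm a b, bxor_assoc]

theorem bxor_cancel_left (a b : Int) : PySem.Int.bxor a (PySem.Int.bxor a b) = b := by
  rw [← bxor_assoc, PySem.Int.bxor_self, PySem.Int.bxor_comm, PySem.Int.bxor_zero]

theorem bxor_eq_zero_iff (a b : Int) : PySem.Int.bxor a b = 0 ↔ a = b := by
  constructor
  · intro h
    have h2 := congrArg (PySem.Int.bxor a) h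
    rw [bxor_cancel_left, PySem.Int.bxor_zero] at h2
    exact h2.symm
  · intro h; rw [h, PySem.Int.bxor_self]

-- the two loop bodies keep the same mismatch-xor: v ^ b[m] = px' ^ py'
theorem bxor_shuffle (w x y z : Int) :
    PySem.Int.bxor (PySem.Int.bxor w (PySem.Int.bxor x y)) z
      = PySem.Int.bxor (PySem.Int.bxor x w) (PySem.Int.bxor y z) := by
  simp only [bxor_assoc]
  rw [bxor_left_comm w x]

-- loop invariant: after the first m steps, A's list is B's list with the running carry
-- px ^ py folded into position m, and the two counters agree
theorem loop_inv (b a : List Int) (m : Nat) (hm : m < a.length) (hb : m ≤ b.length) :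
    (((PySem.List.pyRange 0 (m : Int) 1).foldl (stepB b) (a, 0, 0, 0)).1.length = a.length)
    ∧ ((PySem.List.pyRange 0 (m : Int) 1).foldl (stepA b) (a, (0 : Int))).1
        = PySem.List.pySetD ((PySem.List.pyRange 0 (m : Int) 1).foldl (stepB b) (a, 0, 0, 0)).1 (m : Int)
            (PySem.Int.bxor
              (PySem.List.pyGetD ((PySem.List.pyRange 0 (m : Int) 1).foldl (stepB b) (a, 0, 0, 0)).1 (m : Int) 0)
              (PySem.Int.bxor ((PySem.List.pyRange 0 (m : Int) 1).foldl (stepB b) (a, 0, 0, 0)).2.1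
                ((PySem.List.pyRange 0 (m : Int) 1).foldl (stepB b) (a, 0, 0, 0)).2.2.1))
    ∧ ((PySem.List.pyRange 0 (m : Int) 1).foldl (stepA b) (a, (0 : Int))).2
        = ((PySem.List.pyRange 0 (m : Int) 1).foldl (stepB b) (a, 0, 0, 0)).2.2.2 := by
  induction m with
  | zero =>
      refine ⟨rfl, ?_, rfl⟩
      simp only [Nat.cast_zero, PySem.List.pyRange_zero, Int.toNat_zero, List.range_zero,
        List.map_nil, List.foldl_nil]
      rw [PySem.Int.bxor_self, PySem.Int.bxor_zero]
      show a = PySem.List.pySetD a (((0 : Nat) : Int))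
        (PySem.List.pyGetD a (((0 : Nat) : Int)) (0 : Int))
      rw [PySem.List.pySetD_natCast]
      rw [PySem.List.pyGetD_eq_getElem a 0 (Int.natCast_nonneg _) (by exact_mod_cast hm)]
      simp only [Int.toNat_natCast]
      exact (List.set_getElem_self (by simpa using hm)).symm
  | succ k ih =>
      have hk : k < a.length := by omega
      obtain ⟨ihlen, ih1, ih2⟩ := ih hk (by omega)
      have hsplit : PySem.List.pyRange 0 ((k + 1 : Nat) : Int)
          = PySem.List.pyRange 0 (k : Int) ++ [(k : Int)] := by
        have h1 : ((k + 1 : Nat) : Int) = (k : Int) + 1 := by push_cast; ring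
        rw [h1, PySem.List.pyRange_one_succ_right (by positivity)]
      simp only [hsplit, List.foldl_append, List.foldl_cons, List.foldl_nil]
      set FB := (PySem.List.pyRange 0 (k : Int)).foldl (stepB b) (a, 0, 0, 0) with hFB
      have ihpair : (PySem.List.pyRange 0 (k : Int)).foldl (stepA b) (a, (0 : Int))
          = (PySem.List.pySetD FB.1 (k : Int)
              (PySem.Int.bxor (PySem.List.pyGetD FB.1 (k : Int) 0)
                (PySem.Int.bxor FB.2.1 FB.2.2.1)), FB.2.2.2) :=
        Prod.ext_iff.2 ⟨ih1, ih2⟩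
      rw [ihpair]
      simp only [stepA, stepB]
      set am := PySem.List.pyGetD FB.1 (k : Int) 0 with ham
      set bm := PySem.List.pyGetD b (k : Int) 0 with hbm
      set c := PySem.Int.bxor FB.2.1 FB.2.2.1 with hc
      have hlen1 : k < FB.1.length := by omega
      have hread : PySem.List.pyGetD (PySem.List.pySetD FB.1 (k : Int) (PySem.Int.bxor am c))
          (k : Int) 0 = PySem.Int.bxor am c := by
        rw [PySem.List.pyGetD_pySetD_natCast FB.1 k k _ _ hlen1]; simp
      have hcarry : PySem.Int.bxor (PySem.Int.bxor am c) bm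
          = PySem.Int.bxor (PySem.Int.bxor FB.2.1 am) (PySem.Int.bxor FB.2.2.1 bm) := by
        rw [hc]
        exact bxor_shuffle am FB.2.1 FB.2.2.1 bm
      rw [hread]
      by_cases hEq : PySem.Int.bxor am c = bm
      · have hzero : PySem.Int.bxor (PySem.Int.bxor FB.2.1 am)
            (PySem.Int.bxor FB.2.2.1 bm) = 0 := by
          rw [← hcarry, hEq, PySem.Int.bxor_self]
        have heq2 : PySem.Int.bxor FB.2.1 am = PySem.Int.bxor FB.2.2.1 bm :=
          (bxor_eq_zero_iff _ _).1 hzero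
        rw [if_pos hEq]
        refine ⟨by simp [ihlen], ?_, by simp [heq2]⟩
        rw [hzero, PySem.Int.bxor_zero, hEq]
        have hlenL : k + 1 < (PySem.List.pySetD FB.1 (k : Int) bm).length := by
          rw [PySem.List.length_pySetD]; omega
        rw [PySem.List.pyGetD_eq_getElem _ 0 (Int.natCast_nonneg _) (by exact_mod_cast hlenL)]
        rw [PySem.List.pySetD_natCast (PySem.List.pySetD FB.1 (k : Int) bm)]
        simp only [Int.toNat_natCast]
        exact (List.set_getElem_self hlenL).symm
      · have hne2 : PySem.Int.bxor FB.2.1 am ≠ PySem.Int.bxor FB.2.2.1 bm := by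
          intro h
          exact hEq ((bxor_eq_zero_iff _ _).1 (by rw [hcarry, h, PySem.Int.bxor_self]))
        rw [if_neg hEq]
        refine ⟨by simp [ihlen], ?_, by simp [hne2]⟩
        rw [bxor_cancel_left]
        have hdd : PySem.List.pySetD
            (PySem.List.pySetD FB.1 (k : Int) (PySem.Int.bxor am c)) (k : Int) bm
            = PySem.List.pySetD FB.1 (k : Int) bm := by
          rw [PySem.List.pySetD_natCast, PySem.List.pySetD_natCast, PySem.List.pySetD_natCast,
            List.set_set]
        rw [hdd, hcarry]
        have hcast : ((k + 1 : Nat) : Int) = (k : Int) + 1 := by push_cast; ring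
        rw [hcast]

-- ===== VERDICT (by name: the statement is the Claim_ definition above) =====
theorem solution_spec : Claim_equal_solution := by
  intro n a b _ hpre
  unfold Spec_solution
  by_cases h2 : 2 ≤ n
  · have hml : n - 1 = (((n - 1).toNat : Nat) : Int) := by omega
    have hpre' : n ≤ (a.length : Int) ∧ n - 1 ≤ (b.length : Int) := by
      rcases hpre with h | h
      · omega
      · exact h
    have hm : (n - 1).toNat < a.length := by omega
    have hb : (n - 1).toNat ≤ b.length := by omega
    obtain ⟨_, h1, hcnt⟩ := loop_inv b a (n - 1).toNat hm hb
    simp only [solution, solution_alt]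
    rw [hml, h1, hcnt, if_pos h2]
  · have hnil : PySem.List.pyRange 0 (n - 1) = [] :=
      PySem.List.pyRange_one_eq_nil (by omega)
    simp only [solution, solution_alt, hnil, List.foldl_nil]
    rw [if_neg h2]
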